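-- pv_equiv track=rewrite | github.com/east-coast-enduro-association/ecea-ui | src/utils/pdf-to-markdown.py | parse_class_results
-- ===== SOURCE A (Python) =====
-- def clean_cell(cell: str | None) -> str:
--     """Clean a table cell value."""
--     if cell is None:
--         return ""
--     # Remove extra whitespace and newlines
--     return " ".join(str(cell).split()).strip()
--
-- def parse_class_results(tables: list) -> str:
--     """Parse class results PDF and generate markdown."""
--     markdown_lines = []
--     current_class = None
--     class_data = []
--
--     for table in tables:
--         for row in table:
--             if not row or all(cell is None or str(cell).strip() == "" for cell in row):
--                 continue
--
--             cleaned_row = [clean_cell(cell) for cell in row]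
--
--             # Skip header rows
--             if "Place" in cleaned_row and "Club" in cleaned_row:
--                 continue
--             if "Rider Name" in cleaned_row:
--                 continue
--
--             # Check if this is a class header (single cell with class name)
--             non_empty = [c for c in cleaned_row if c]
--             if len(non_empty) == 1:
--                 potential_class = non_empty[0]
--                 # Check if it looks like a class name
--                 if any(cls in potential_class for cls in ["AA", "A ", "B ", "C ", "Women", "Masters", "Golden", "Legends"]):
--                     # Save previous class data
--                     if current_class and class_data:
--                         markdown_lines.append(format_class_table(current_class, class_data))
--                     current_class = potential_class
--                     class_data = []
--                     continue
--
--             # Check if first cell is a number (place)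
--             if cleaned_row and cleaned_row[0] and cleaned_row[0].isdigit():
--                 # This is a rider row
--                 class_data.append(cleaned_row)
--
--     # Don't forget the last class
--     if current_class and class_data:
--         markdown_lines.append(format_class_table(current_class, class_data))
--
--     return "\n".join(markdown_lines)
--
-- def format_class_table(class_name: str, data: list) -> str:
--     """Format a single class table as markdown."""
--     lines = []
--     lines.append(f"\n## {class_name}\n")
--     lines.append("| Place | Club | Rider Name | Class | Brand | Events | Total |")
--     lines.append("|-------|------|------------|-------|-------|--------|-------|")
--
--     for row in data:
--         # Ensure we have enough columns, pad with empty strings if needed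
--         while len(row) < 6:
--             row.append("")
--
--         place = row[0] if len(row) > 0 else ""
--         club = row[1] if len(row) > 1 else ""
--         rider = row[2] if len(row) > 2 else ""
--         cls = row[3] if len(row) > 3 else ""
--         brand = row[4] if len(row) > 4 else ""
--         events = row[5] if len(row) > 5 else ""
--         total = row[6] if len(row) > 6 else ""
--
--         # Title case the rider name
--         rider = rider.title() if rider else ""
--
--         lines.append(f"| {place} | {club} | {rider} | {cls} | {brand} | {events} | {total} |")
--
--     return "\n".join(lines)
-- ===== SOURCE B (Python) =====
-- # B: staged passes — tokenize every row once into a flat token list, then for each class-header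
-- # token scan FORWARD in the token list (a slice up to the next header) to collect its riders,
-- # then render.  No running current-class/accumulator state, no flush-on-next-header.
-- def clean_cell(cell):
--     if cell is None:
--         return ""
--     return " ".join(str(cell).split()).strip()
--
-- def classify_row(row):
--     """Classify one raw row: ('skip',) | ('class', name) | ('rider', cleaned_row)."""
--     if not row or all(cell is None or str(cell).strip() == "" for cell in row):
--         return ("skip",)
--     cleaned = [clean_cell(cell) for cell in row]
--     if "Place" in cleaned and "Club" in cleaned:
--         return ("skip",)
--     if "Rider Name" in cleaned:
--         return ("skip",)
--     non_empty = [c for c in cleaned if c]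
--     if len(non_empty) == 1 and any(
--         k in non_empty[0] for k in ["AA", "A ", "B ", "C ", "Women", "Masters", "Golden", "Legends"]
--     ):
--         return ("class", non_empty[0])
--     if cleaned and cleaned[0] and cleaned[0].isdigit():
--         return ("rider", cleaned)
--     return ("skip",)
--
-- def format_class_table(class_name, data):
--     lines = []
--     lines.append(f"\n## {class_name}\n")
--     lines.append("| Place | Club | Rider Name | Class | Brand | Events | Total |")
--     lines.append("|-------|------|------------|-------|-------|--------|-------|")
--     for row in data:
--         while len(row) < 6:
--             row.append("")
--         place = row[0] if len(row) > 0 else ""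
--         club = row[1] if len(row) > 1 else ""
--         rider = row[2] if len(row) > 2 else ""
--         cls = row[3] if len(row) > 3 else ""
--         brand = row[4] if len(row) > 4 else ""
--         events = row[5] if len(row) > 5 else ""
--         total = row[6] if len(row) > 6 else ""
--         rider = rider.title() if rider else ""
--         lines.append(f"| {place} | {club} | {rider} | {cls} | {brand} | {events} | {total} |")
--     return "\n".join(lines)
--
-- def parse_class_results(tables):
--     # Pass 1: tokenize all rows, keeping only class-header and rider tokens.
--     toks = [t for tb in tables for t in map(classify_row, tb) if t[0] != "skip"]
--     # Pass 2: each header owns the rider tokens between it and the next header —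
--     # found by scanning forward in the slice after it (riders before any header have no owner).
--     segments = []
--     for j, t in enumerate(toks):
--         if t[0] == "class":
--             rows = []
--             for u in toks[j + 1:]:
--                 if u[0] == "class":
--                     break
--                 rows.append(u[1])
--             segments.append((t[1], rows))
--     # Pass 3: render the segments that own at least one rider row.
--     return "\n".join(format_class_table(name, rows) for name, rows in segments if rows)
-- ===== Notes on version B (the rewrite author's own statement) =====
-- stated objective: alternative
-- what changed: A is one stateful loop that maintains current_class/class_data and flushes a table whenever the next class header arrives (plus a trailing flush); B has no running state: it first tokenizes all rows into a flat header/rider token list, then each header collects its riders by a forward scan of the slice up to the next header, then renders.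
import Mathlib
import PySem

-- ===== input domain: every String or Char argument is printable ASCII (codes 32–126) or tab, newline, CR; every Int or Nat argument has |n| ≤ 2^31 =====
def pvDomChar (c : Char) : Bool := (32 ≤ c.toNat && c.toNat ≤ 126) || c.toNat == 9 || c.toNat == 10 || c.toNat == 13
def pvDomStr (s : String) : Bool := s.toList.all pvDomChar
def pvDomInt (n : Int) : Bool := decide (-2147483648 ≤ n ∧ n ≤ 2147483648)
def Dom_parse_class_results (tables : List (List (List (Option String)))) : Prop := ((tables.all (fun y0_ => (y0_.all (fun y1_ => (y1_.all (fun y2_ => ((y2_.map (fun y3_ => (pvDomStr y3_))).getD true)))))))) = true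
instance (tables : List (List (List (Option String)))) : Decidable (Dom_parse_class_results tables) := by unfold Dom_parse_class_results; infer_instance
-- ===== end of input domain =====

-- B replaces A's stateful flush-on-next-header loop by staged passes: tokenize all rows into a
-- flat header/rider token list, let each header collect its riders by a forward scan of the
-- slice up to the next header, then render; same output, objective: alternative decomposition.
-- Neither program mutates its argument observably (only freshly built row copies are padded).

-- ===== shared helpers (identical in both Python sources) =====

def clean_cell (cell : Option String) : String :=
  match cell with
  | none => ""
  | some s => PySem.Str.strip (PySem.Str.join " " (PySem.Str.split₀ s))

-- hand port of str.title(): exact on this ASCII domain, where 'cased' coincides with isalpha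
def titleChars : List Char → Bool → List Char
  | [], _ => []
  | c :: rest, prevCased =>
    (if PySem.Chars.isalpha c then
       (if prevCased then PySem.Chars.lowerChar c else PySem.Chars.upperChar c)
     else c) :: titleChars rest (PySem.Chars.isalpha c)

def pyTitle (s : String) : String := String.ofList (titleChars s.toList false)

-- 'while len(row) < 6: row.append("")'
def pad6 (row : List String) : List String :=
  if row.length < 6 then pad6 (row ++ [""]) else row
termination_by 6 - row.length
decreasing_by simp [List.length_append]; omega

def format_row (row : List String) : String :=
  let row := pad6 row
  let place := row.getD 0 ""
  let club := row.getD 1 ""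
  let rider := row.getD 2 ""
  let cls := row.getD 3 ""
  let brand := row.getD 4 ""
  let events := row.getD 5 ""
  let total := row.getD 6 ""
  let rider := if rider != "" then pyTitle rider else ""
  PySem.Str.join "" ["| ", place, " | ", club, " | ", rider, " | ", cls, " | ", brand, " | ", events, " | ", total, " |"]

def format_class_table (class_name : String) (data : List (List String)) : String :=
  PySem.Str.join "\n"
    ([PySem.Str.join "" ["\n## ", class_name, "\n"],
      "| Place | Club | Rider Name | Class | Brand | Events | Total |",
      "|-------|------|------------|-------|-------|--------|-------|"]
     ++ data.map format_row)

def pvKeywords : List String := ["AA", "A ", "B ", "C ", "Women", "Masters", "Golden", "Legends"]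

-- ===== PORT A =====

-- 'if current_class and class_data: markdown_lines.append(format_class_table(...))' (appears twice in A)
def emitA (lines : List String) (cc : Option String) (cd : List (List String)) : List String :=
  match cc with
  | some c => if c != "" && !cd.isEmpty then lines ++ [format_class_table c cd] else lines
  | none => lines

def stepA (st : List String × Option String × List (List String)) (row : List (Option String)) :
    List String × Option String × List (List String) :=
  if row.isEmpty || row.all (fun cell => match cell with | none => true | some s => PySem.Str.strip s == "") then st
  else
    let cleaned := row.map clean_cell
    if cleaned.contains "Place" && cleaned.contains "Club" then st
    else if cleaned.contains "Rider Name" then st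
    else
      let riderCheck :=
        match cleaned with
        | [] => st
        | c0 :: _ => if c0 != "" && PySem.Str.strIsdigit c0 then (st.1, st.2.1, st.2.2 ++ [cleaned]) else st
      let non_empty := cleaned.filter (fun c => c != "")
      if non_empty.length == 1 then
        -- potential_class = non_empty[0] (safe: the length is 1)
        let p := non_empty.headD ""
        if pvKeywords.any (fun k => PySem.Str.isIn k p) then
          (emitA st.1 st.2.1 st.2.2, some p, [])
        else riderCheck
      else riderCheck

def parse_class_results (tables : List (List (List (Option String)))) : String :=
  let fin := tables.foldl (fun st table => table.foldl stepA st)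
    (([] : List String), (none : Option String), ([] : List (List String)))
  PySem.Str.join "\n" (emitA fin.1 fin.2.1 fin.2.2)

-- ===== PORT B =====

inductive RowKind where
  | skip
  | classHeader (name : String)
  | rider (cleaned : List String)
deriving Repr, DecidableEq

def classify_row (row : List (Option String)) : RowKind :=
  if row.isEmpty || row.all (fun cell => match cell with | none => true | some s => PySem.Str.strip s == "") then .skip
  else
    let cleaned := row.map clean_cell
    if cleaned.contains "Place" && cleaned.contains "Club" then .skip
    else if cleaned.contains "Rider Name" then .skip
    else
      let nonEmpty := cleaned.filter (fun c => c != "")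
      if nonEmpty.length == 1 && pvKeywords.any (fun k => PySem.Str.isIn k (nonEmpty.headD "")) then
        .classHeader (nonEmpty.headD "")
      else
        match cleaned with
        | [] => .skip
        | c0 :: _ => if c0 != "" && PySem.Str.strIsdigit c0 then .rider cleaned else .skip

-- pass 1: '[t for tb in tables for t in map(classify_row, tb) if t[0] != "skip"]'
def toksOf (tables : List (List (List (Option String)))) : List RowKind :=
  tables.flatMap (fun tb => (tb.map classify_row).filter (fun t => t != RowKind.skip))

-- inner loop 'for u in toks[j+1:]: if u[0]=="class": break; rows.append(u[1])'
-- (the skip case is unreachable: pass 1 removed all skip tokens)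
def collectRows : List RowKind → List (List String)
  | [] => []
  | .classHeader _ :: _ => []
  | .rider cl :: rest => cl :: collectRows rest
  | .skip :: rest => collectRows rest

-- pass 2, the 'for j, t in enumerate(toks)' loop: at index j the slice toks[j+1:] is the tail
def segmentsOf : List RowKind → List (String × List (List String))
  | [] => []
  | .classHeader n :: rest => (n, collectRows rest) :: segmentsOf rest
  | _ :: rest => segmentsOf rest

def parse_class_results_alt (tables : List (List (List (Option String)))) : String :=
  let segments := segmentsOf (toksOf tables)
  PySem.Str.join "\n" ((segments.filter (fun s => !s.2.isEmpty)).map (fun s => format_class_table s.1 s.2))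

-- ===== PRECONDITION & SPEC =====
def Spec_parse_class_results (tables : List (List (List (Option String)))) (out : String) : Prop := out = parse_class_results_alt tables
instance (tables : List (List (List (Option String)))) (out : String) : Decidable (Spec_parse_class_results tables out) := by unfold Spec_parse_class_results; infer_instance

-- ===== CLAIM (what is proved, stated in full; the proofs are below) =====
def Claim_equal_parse_class_results : Prop := ∀ (tables : List (List (List (Option String)))), Dom_parse_class_results tables → Spec_parse_class_results tables (parse_class_results tables)

-- ===== LEMMAS AND PROOFS =====

def render (segs : List (String × List (List String))) : List String :=
  (segs.filter (fun s => !s.2.isEmpty)).map (fun s => format_class_table s.1 s.2)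

-- 'append the rider to the most recent segment, if any'
def appendToLastPV (segs : List (String × List (List String))) (r : List String) :
    List (String × List (List String)) :=
  match segs with
  | [] => []
  | [(n, rs)] => [(n, rs ++ [r])]
  | s :: rest => s :: appendToLastPV rest r

-- proof-only intermediate: A's grouping behaviour on one token
def foldT (segs : List (String × List (List String))) (t : RowKind) :
    List (String × List (List String)) :=
  match t with
  | .classHeader n => segs ++ [(n, [])]
  | .rider cl => appendToLastPV segs cl
  | .skip => segs

def PVInv (st : List String × Option String × List (List String))
    (segs : List (String × List (List String))) : Prop :=
  (segs = [] ∧ st.2.1 = none ∧ st.1 = []) ∨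
  (∃ init n rows, segs = init ++ [(n, rows)] ∧ st.2.1 = some n ∧ n ≠ "" ∧ st.2.2 = rows ∧ st.1 = render init)

theorem render_append_one (init : List (String × List (List String))) (n : String) (rows : List (List String)) :
    render (init ++ [(n, rows)]) = render init ++ (if !rows.isEmpty then [format_class_table n rows] else []) := by
  cases rows <;> simp [render, List.filter_append]

theorem emitA_last (init : List (String × List (List String))) (n : String) (rows : List (List String))
    (hn : n ≠ "") :
    emitA (render init) (some n) rows = render (init ++ [(n, rows)]) := by
  rw [render_append_one]
  cases rows <;> simp [emitA, hn]

theorem appendToLastPV_concat (init : List (String × List (List String))) (n rows r) :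
    appendToLastPV (init ++ [(n, rows)]) r = init ++ [(n, rows ++ [r])] := by
  induction init with
  | nil => rfl
  | cons s rest ih =>
    cases rest with
    | nil => cases s; rfl
    | cons t ts => simpa [appendToLastPV] using ih

theorem classify_classHeader_ne (row : List (Option String)) (n : String)
    (h : classify_row row = .classHeader n) : n ≠ "" := by
  simp only [classify_row] at h
  split at h
  · exact absurd h (by simp)
  · split at h
    · exact absurd h (by simp)
    · split at h
      · exact absurd h (by simp)
      · split at h
        · rename_i hcond
          cases hn : (row.map clean_cell).filter (fun c => c != "") with
          | nil => rw [hn] at hcond; simp at hcond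
          | cons p ps =>
            rw [hn] at h
            cases h
            have hmem : p ∈ (row.map clean_cell).filter (fun c => c != "") := by
              rw [hn]; exact List.mem_cons_self
            have hp := List.of_mem_filter hmem
            simpa [List.headD] using hp
        · split at h
          · exact absurd h (by simp)
          · split at h <;> simp at h

theorem rider_eq (st : List String × Option String × List (List String)) (cleaned : List String) :
    (match cleaned with
     | [] => st
     | c0 :: _ => if (c0 != "" && PySem.Str.strIsdigit c0) = true then (st.1, st.2.1, st.2.2 ++ [cleaned]) else st)
    = (match (match cleaned with
        | [] => RowKind.skip
        | c0 :: _ => if (c0 != "" && PySem.Str.strIsdigit c0) = true then RowKind.rider cleaned else RowKind.skip) with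
       | RowKind.skip => st
       | RowKind.classHeader n => (emitA st.1 st.2.1 st.2.2, some n, [])
       | RowKind.rider cl => (st.1, st.2.1, st.2.2 ++ [cl])) := by
  cases cleaned with
  | nil => rfl
  | cons c0 cs =>
    dsimp only
    by_cases hd : (c0 != "" && PySem.Str.strIsdigit c0) = true
    · rw [if_pos hd, if_pos hd]
    · rw [if_neg hd, if_neg hd]

theorem stepA_classify (st : List String × Option String × List (List String)) (row : List (Option String)) :
    stepA st row =
      match classify_row row with
      | .skip => st
      | .classHeader n => (emitA st.1 st.2.1 st.2.2, some n, [])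
      | .rider cl => (st.1, st.2.1, st.2.2 ++ [cl]) := by
  simp only [stepA, classify_row]
  split
  · rfl
  · split
    · rfl
    · split
      · rfl
      · by_cases h1 : ((((row.map clean_cell).filter (fun c => c != "")).length == 1) = true)
        · by_cases h2 : ((pvKeywords.any fun k => PySem.Str.isIn k (((row.map clean_cell).filter (fun c => c != "")).headD "")) = true)
          · rw [if_pos h1, if_pos h2, if_pos (show _ = true by rw [h1, h2]; rfl)]
          · rw [if_pos h1, if_neg h2, if_neg (show ¬ _ = true by simp only [Bool.and_eq_true]; exact fun h => h2 h.2)]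
            exact rider_eq st (row.map clean_cell)
        · rw [if_neg h1, if_neg (show ¬ _ = true by simp only [Bool.and_eq_true]; exact fun h => h1 h.1)]
          exact rider_eq st (row.map clean_cell)

theorem inv_step (st segs row) (h : PVInv st segs) :
    PVInv (stepA st row) (foldT segs (classify_row row)) := by
  rw [stepA_classify]
  cases hc : classify_row row with
  | skip => exact h
  | classHeader n =>
    have hn : n ≠ "" := classify_classHeader_ne row n hc
    rcases h with ⟨hs, hcc, hl⟩ | ⟨init, m, rows, hs, hcc, hm, hcd, hl⟩
    · subst hs
      exact Or.inr ⟨[], n, [], by simp [foldT], rfl, hn, rfl, by simp [hcc, hl, emitA, render]⟩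
    · subst hs
      refine Or.inr ⟨init ++ [(m, rows)], n, [], by simp [foldT], rfl, hn, rfl, ?_⟩
      simp only [hcc, hcd, hl]
      exact emitA_last init m rows hm
  | rider cl =>
    dsimp only [foldT]
    rcases h with ⟨hs, hcc, hl⟩ | ⟨init, m, rows, hs, hcc, hm, hcd, hl⟩
    · subst hs
      exact Or.inl ⟨rfl, hcc, hl⟩
    · subst hs
      rw [appendToLastPV_concat]
      exact Or.inr ⟨init, m, rows ++ [cl], rfl, hcc, hm, by simp [hcd], hl⟩

theorem inv_foldl (rows : List (List (Option String))) (st segs) (h : PVInv st segs) :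
    PVInv (rows.foldl stepA st) ((rows.map classify_row).foldl foldT segs) := by
  induction rows generalizing st segs with
  | nil => exact h
  | cons r rs ih => exact ih _ _ (inv_step st segs r h)

theorem inv_foldl2 (tables : List (List (List (Option String)))) (st segs) (h : PVInv st segs) :
    PVInv (tables.foldl (fun st t => t.foldl stepA st) st)
      (tables.foldl (fun segs t => (t.map classify_row).foldl foldT segs) segs) := by
  induction tables generalizing st segs with
  | nil => exact h
  | cons t ts ih => exact ih _ _ (inv_foldl t st segs h)

-- the accumulator fold over tokens computes exactly B's forward-scan segmentation
theorem foldT_concat (ts : List RowKind) (init : List (String × List (List String))) (n rows) :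
    ts.foldl foldT (init ++ [(n, rows)]) = init ++ (n, rows ++ collectRows ts) :: segmentsOf ts := by
  induction ts generalizing init n rows with
  | nil => simp [collectRows, segmentsOf]
  | cons t rest ih =>
    cases t with
    | skip => simpa [foldT, collectRows, segmentsOf] using ih init n rows
    | classHeader m =>
      have := ih (init ++ [(n, rows)]) m []
      simp only [List.foldl_cons, foldT] at *
      rw [List.append_assoc] at this
      simpa [collectRows, segmentsOf] using this
    | rider cl =>
      simp only [List.foldl_cons, foldT, appendToLastPV_concat]
      rw [ih init n (rows ++ [cl])]
      simp [collectRows, segmentsOf]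

theorem foldT_nil (ts : List RowKind) : ts.foldl foldT [] = segmentsOf ts := by
  induction ts with
  | nil => rfl
  | cons t rest ih =>
    cases t with
    | skip => simpa [foldT, segmentsOf] using ih
    | classHeader m =>
      simp only [List.foldl_cons, foldT, List.nil_append]
      simpa [segmentsOf] using foldT_concat rest [] m []
    | rider cl => simpa [foldT, appendToLastPV, segmentsOf] using ih

-- skip tokens are transparent to both collectRows and segmentsOf, so pass 1's filter is harmless
theorem collectRows_filter (ts : List RowKind) :
    collectRows (ts.filter (fun t => t != RowKind.skip)) = collectRows ts := by
  induction ts with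
  | nil => rfl
  | cons t rest ih => cases t <;> simp [collectRows, ih]

theorem segmentsOf_filter (ts : List RowKind) :
    segmentsOf (ts.filter (fun t => t != RowKind.skip)) = segmentsOf ts := by
  induction ts with
  | nil => rfl
  | cons t rest ih => cases t <;> simp [segmentsOf, ih, collectRows_filter]

theorem flatMap_filter_map {α β : Type} (f : α → β) (p : β → Bool) (L : List (List α)) :
    L.flatMap (fun tb => (tb.map f).filter p) = (L.flatten.map f).filter p := by
  induction L with
  | nil => rfl
  | cons tb rest ih => simp [List.flatten_cons, List.map_append, List.filter_append, ih]

theorem toksOf_eq (tables : List (List (List (Option String)))) :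
    toksOf tables = (tables.flatten.map classify_row).filter (fun t => t != RowKind.skip) := by
  exact flatMap_filter_map classify_row _ tables

theorem foldl_tables (tables : List (List (List (Option String)))) (segs) :
    tables.foldl (fun segs t => (t.map classify_row).foldl foldT segs) segs =
      (tables.flatten.map classify_row).foldl foldT segs := by
  induction tables generalizing segs with
  | nil => rfl
  | cons tb rest ih => simp [List.flatten_cons, List.map_append, List.foldl_append, ih]

theorem segments_eq (tables : List (List (List (Option String)))) :
    tables.foldl (fun segs t => (t.map classify_row).foldl foldT segs) [] =
      segmentsOf (toksOf tables) := by
  rw [foldl_tables, foldT_nil, toksOf_eq, segmentsOf_filter]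

-- ===== VERDICT (by name: the statement is the Claim_ definition above) =====
theorem parse_class_results_spec : Claim_equal_parse_class_results := by
  intro tables _
  unfold Spec_parse_class_results parse_class_results parse_class_results_alt
  dsimp only
  have hinv := inv_foldl2 tables ([], none, []) [] (Or.inl ⟨rfl, rfl, rfl⟩)
  rw [segments_eq] at hinv
  rcases hinv with ⟨hs, hcc, hl⟩ | ⟨init, n, rows, hs, hcc, hn, hcd, hl⟩
  · rw [hcc, hl, hs]
    rfl
  · rw [hcc, hcd, hl, emitA_last init n rows hn, hs]
    rfl
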